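-- pv_equiv track=rewrite | github.com/Xjajwjjsjs/PyroX | userbot.py | _ar_parse_options
-- ===== SOURCE A (Python) =====
-- def _ar_parse_options(content: str):
--     """解析回复内容中的 delay/ttl/limit 参数"""
--     delay, ttl, limit = 0, 0, 0
--     if " || " in content:
--         text_part, opt_part = content.rsplit(" || ", 1)
--         for seg in opt_part.split(","):
--             seg = seg.strip()
--             if seg.startswith("delay="):
--                 try: delay = int(seg[6:])
--                 except: pass
--             elif seg.startswith("ttl="):
--                 try: ttl = int(seg[4:])
--                 except: pass
--             elif seg.startswith("limit="):
--                 try: limit = max(1, int(seg[6:]))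
--                 except: pass
--     else:
--         text_part = content
--     return text_part.strip(), delay, ttl, limit
-- ===== SOURCE B (Python) =====
-- def _ar_parse_options(content: str):
--     """解析回复内容中的 delay/ttl/limit 参数"""
--     text_part, sep, opt_part = content.rpartition(" || ")
--     if not sep:
--         return content.strip(), 0, 0, 0
--     segs = [s.strip() for s in opt_part.split(",")]
--
--     def last_value(prefix):
--         # the last successful assignment wins, so search back-to-front
--         for s in reversed(segs):
--             if s.startswith(prefix):
--                 try:
--                     return int(s[len(prefix):])
--                 except ValueError:
--                     pass
--         return None
--
--     delay = last_value("delay=")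
--     ttl = last_value("ttl=")
--     limit = last_value("limit=")
--     return (text_part.strip(),
--             delay if delay is not None else 0,
--             ttl if ttl is not None else 0,
--             max(1, limit) if limit is not None else 0)
-- ===== Notes on version B (the rewrite author's own statement) =====
-- stated objective: alternative
-- what changed: B splits with rpartition and then computes each of delay/ttl/limit independently by a backward search over the stripped segments for the last successful assignment of that key, instead of A's single forward fold that mutates three state variables segment by segment.
import Mathlib
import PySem

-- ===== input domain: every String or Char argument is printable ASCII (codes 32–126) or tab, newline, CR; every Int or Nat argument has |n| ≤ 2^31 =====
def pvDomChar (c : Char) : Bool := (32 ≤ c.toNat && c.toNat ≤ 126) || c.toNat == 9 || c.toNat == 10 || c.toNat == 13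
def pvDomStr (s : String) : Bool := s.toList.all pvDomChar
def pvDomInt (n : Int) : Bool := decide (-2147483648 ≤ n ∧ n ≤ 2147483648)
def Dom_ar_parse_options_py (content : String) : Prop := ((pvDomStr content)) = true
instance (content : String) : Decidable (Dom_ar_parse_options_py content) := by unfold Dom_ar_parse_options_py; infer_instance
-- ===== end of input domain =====

-- B computes delay/ttl/limit by three independent backward searches for the last successful
-- assignment of each key, replacing A's single forward fold over three state variables
-- (alternative decomposition, same cost). Both functions are pure.

-- ===== PORT A =====
-- one iteration of A's for-loop over the comma-split segments; state = (delay, ttl, limit)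
def arStepA (st : Int × Int × Int) (seg : List Char) : Int × Int × Int :=
  let s := PySem.Chars.strip seg
  if PySem.Chars.startswith s "delay=".toList then
    match PySem.Int.ofChars? (s.drop 6) with   -- seg[6:] : nonnegative slice start = drop, exact
    | some n => (n, st.2.1, st.2.2)
    | none => st
  else if PySem.Chars.startswith s "ttl=".toList then
    match PySem.Int.ofChars? (s.drop 4) with   -- seg[4:]
    | some n => (st.1, n, st.2.2)
    | none => st
  else if PySem.Chars.startswith s "limit=".toList then
    match PySem.Int.ofChars? (s.drop 6) with   -- seg[6:]
    | some n => (st.1, st.2.1, max 1 n)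
    | none => st
  else st

-- port of content.rsplit(" || ", 1), exact when sep occurs in s (A calls it only under the guard)
def pyRsplit1 (s sep : List Char) : List Char × List Char :=
  let j := (PySem.Chars.rfind s sep).toNat
  (s.take j, s.drop (j + sep.length))

def ar_parse_options_py (content : String) : String × Int × Int × Int :=
  if PySem.Str.isIn " || " content then
    let (text, opt) := pyRsplit1 content.toList " || ".toList
    let r := (PySem.Chars.splitOn opt ",".toList).foldl arStepA (0, 0, 0)
    (String.ofList (PySem.Chars.strip text), r)
  else
    (String.ofList (PySem.Chars.strip content.toList), 0, 0, 0)

-- ===== PORT B =====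
-- hand port of s.rpartition(sep): (before, sep, after), or ('', '', s) when sep is absent; exact
def pyRpartition (s sep : List Char) : List Char × List Char × List Char :=
  if PySem.Chars.isIn sep s then
    let j := (PySem.Chars.rfind s sep).toNat
    (s.take j, sep, s.drop (j + sep.length))
  else ([], [], s)

-- B's last_value loop over reversed(segs): first segment (front of the reversed list)
-- that starts with the prefix and whose remainder parses as an int; try/except = the match
def arLastValue (pre : List Char) : List (List Char) → Option Int
  | [] => none
  | s :: rest =>
    if PySem.Chars.startswith s pre then
      match PySem.Int.ofChars? (s.drop pre.length) with
      | some n => some n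
      | none => arLastValue pre rest
    else arLastValue pre rest

def ar_parse_options_py_alt (content : String) : String × Int × Int × Int :=
  let r := pyRpartition content.toList " || ".toList
  if r.2.1 ≠ [] then
    let segs := (PySem.Chars.splitOn r.2.2 ",".toList).map PySem.Chars.strip
    let delay := arLastValue "delay=".toList segs.reverse
    let ttl := arLastValue "ttl=".toList segs.reverse
    let limit := arLastValue "limit=".toList segs.reverse
    (String.ofList (PySem.Chars.strip r.1),
      delay.getD 0, ttl.getD 0,
      match limit with | some n => max 1 n | none => 0)
  else
    (String.ofList (PySem.Chars.strip content.toList), 0, 0, 0)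

-- ===== PRECONDITION & SPEC =====
def Spec_ar_parse_options_py (content : String) (out : String × Int × Int × Int) : Prop := out = ar_parse_options_py_alt content
instance (content : String) (out : String × Int × Int × Int) : Decidable (Spec_ar_parse_options_py content out) := by unfold Spec_ar_parse_options_py; infer_instance

-- ===== CLAIM (what is proved, stated in full; the proofs are below) =====
def Claim_equal_ar_parse_options_py : Prop := ∀ (content : String), Dom_ar_parse_options_py content → Spec_ar_parse_options_py content (ar_parse_options_py content)

-- ===== LEMMAS AND PROOFS =====

lemma lastValue_append (p : List Char) (xs ys : List (List Char)) :
    arLastValue p (xs ++ ys) = (arLastValue p xs).orElse (fun _ => arLastValue p ys) := by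
  induction xs with
  | nil => simp [arLastValue, Option.orElse]
  | cons s rest ih =>
    simp only [List.cons_append, arLastValue]
    split_ifs with h
    · cases PySem.Int.ofChars? (s.drop p.length) <;> simp [ih, Option.orElse]
    · exact ih

-- a stripped segment starts with at most one of the three prefixes (their first chars differ)
lemma sw_head (s p : List Char) (h : PySem.Chars.startswith s p = true) (c : Char) (hc : p.head? = some c) :
    s.head? = some c := by
  obtain ⟨u, hu⟩ := (PySem.Chars.startswith_iff s p).mp h
  rw [← hu]
  cases p with
  | nil => simp at hc
  | cons a as => simpa using hc

lemma sw_conflict (s p q : List Char) (c d : Char) (hc : p.head? = some c) (hd : q.head? = some d)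
    (hne : c ≠ d) (hp : PySem.Chars.startswith s p = true) :
    PySem.Chars.startswith s q = false := by
  rw [Bool.eq_false_iff]
  intro hq
  have h1 := sw_head s p hp c hc
  have h2 := sw_head s q hq d hd
  rw [h1] at h2
  exact hne (Option.some.injEq _ _ ▸ h2)

-- A's step, componentwise
lemma stepA_delay (st : Int × Int × Int) (seg : List Char) :
    (arStepA st seg).1 = ((if PySem.Chars.startswith (PySem.Chars.strip seg) "delay=".toList then
        PySem.Int.ofChars? ((PySem.Chars.strip seg).drop 6) else none).getD st.1) := by
  simp only [arStepA]
  split_ifs with h1 h2 h3 <;>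
    first
    | (cases PySem.Int.ofChars? ((PySem.Chars.strip seg).drop 6) <;> rfl)
    | (cases PySem.Int.ofChars? ((PySem.Chars.strip seg).drop 4) <;> rfl)
    | rfl

lemma stepA_ttl (st : Int × Int × Int) (seg : List Char) :
    (arStepA st seg).2.1 = ((if PySem.Chars.startswith (PySem.Chars.strip seg) "ttl=".toList then
        PySem.Int.ofChars? ((PySem.Chars.strip seg).drop 4) else none).getD st.2.1) := by
  simp only [arStepA]
  by_cases ht : PySem.Chars.startswith (PySem.Chars.strip seg) "ttl=".toList = true
  · have hd := sw_conflict (PySem.Chars.strip seg) "ttl=".toList "delay=".toList 't' 'd' rfl rfl (by decide) ht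
    simp only [hd, Bool.false_eq_true, if_false, ht, if_true]
    cases PySem.Int.ofChars? ((PySem.Chars.strip seg).drop 4) <;> rfl
  · simp only [eq_false ht, Bool.false_eq_true, if_false]
    split_ifs with h1 h2 <;>
      first
      | (cases PySem.Int.ofChars? ((PySem.Chars.strip seg).drop 6) <;> rfl)
      | rfl

lemma stepA_limit (st : Int × Int × Int) (seg : List Char) :
    (arStepA st seg).2.2 = (match (if PySem.Chars.startswith (PySem.Chars.strip seg) "limit=".toList then
        PySem.Int.ofChars? ((PySem.Chars.strip seg).drop 6) else none) with
      | some n => max 1 n | none => st.2.2) := by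
  simp only [arStepA]
  by_cases hl : PySem.Chars.startswith (PySem.Chars.strip seg) "limit=".toList = true
  · have hd := sw_conflict (PySem.Chars.strip seg) "limit=".toList "delay=".toList 'l' 'd' rfl rfl (by decide) hl
    have ht := sw_conflict (PySem.Chars.strip seg) "limit=".toList "ttl=".toList 'l' 't' rfl rfl (by decide) hl
    simp only [hd, ht, Bool.false_eq_true, if_false, hl, if_true]
    cases PySem.Int.ofChars? ((PySem.Chars.strip seg).drop 6) <;> rfl
  · simp only [eq_false hl, Bool.false_eq_true, if_false]
    split_ifs with h1 h2 <;>
      first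
      | (cases PySem.Int.ofChars? ((PySem.Chars.strip seg).drop 6) <;> rfl)
      | (cases PySem.Int.ofChars? ((PySem.Chars.strip seg).drop 4) <;> rfl)
      | rfl

-- the search applied to a single stripped segment is the conditional parse
lemma lastValue_single (p s : List Char) :
    arLastValue p [s] = (if PySem.Chars.startswith s p then PySem.Int.ofChars? (s.drop p.length) else none) := by
  simp only [arLastValue]
  split_ifs with h
  · cases PySem.Int.ofChars? (s.drop p.length) <;> rfl
  · rfl

-- the main characterisation: A's fold equals B's three backward searches
lemma foldA_char (segs : List (List Char)) (st : Int × Int × Int) :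
    segs.foldl arStepA st =
      ((arLastValue "delay=".toList ((segs.map PySem.Chars.strip).reverse)).getD st.1,
       (arLastValue "ttl=".toList ((segs.map PySem.Chars.strip).reverse)).getD st.2.1,
       match arLastValue "limit=".toList ((segs.map PySem.Chars.strip).reverse) with
       | some n => max 1 n | none => st.2.2) := by
  induction segs generalizing st with
  | nil => simp [arLastValue]
  | cons s rest ih =>
    rw [List.foldl_cons, ih]
    simp only [List.map_cons, List.reverse_cons, lastValue_append, lastValue_single]
    refine Prod.ext ?_ (Prod.ext ?_ ?_)
    · rw [stepA_delay]
      cases arLastValue "delay=".toList ((rest.map PySem.Chars.strip).reverse) <;>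
        simp [Option.orElse] <;> rfl
    · rw [stepA_ttl]
      cases arLastValue "ttl=".toList ((rest.map PySem.Chars.strip).reverse) <;>
        simp [Option.orElse] <;> rfl
    · rw [stepA_limit]
      cases arLastValue "limit=".toList ((rest.map PySem.Chars.strip).reverse) <;>
        simp [Option.orElse] <;> rfl

-- ===== VERDICT (by name: the statement is the Claim_ definition above) =====
theorem ar_parse_options_py_spec : Claim_equal_ar_parse_options_py := by
  intro content _
  unfold Spec_ar_parse_options_py ar_parse_options_py ar_parse_options_py_alt pyRpartition pyRsplit1
  have hio : PySem.Str.isIn " || " content = PySem.Chars.isIn " || ".toList content.toList := by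
    simp [PySem.Str.isIn]
  by_cases h : PySem.Chars.isIn " || ".toList content.toList = true
  · rw [hio, h]
    have hne : (" || ".toList : List Char) ≠ [] := by decide
    simp only [if_true, if_pos hne, ne_eq, foldA_char]
  · rw [hio]
    simp only [h, Bool.false_eq_true, if_false]
    simp
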